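-- pv_equiv track=rewrite | github.com/key-moon/golf | deflate_optimizer/__init__.py | rle_code_lengths_stream
-- ===== SOURCE A (Python) =====
-- from typing import List, Tuple, Dict, Optional, Callable
--
-- def rle_code_lengths_stream(litlen: List[int], dist: List[int], allow_16=True, allow_17=True, allow_18=True) -> List[Tuple[int,int,int]]:
--     """
--     litlen + dist のコード長列を RFC1951 の RLE で列挙。
--     返値は (symbol, extra_value, extra_bits):
--       - 0..15 : そのままコード長値
--       - 16    : 直前の長さを 3..6 回繰り返す（2 ビットで回数-3 を表す）
--       - 17    : 0 を 3..10 回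
--       - 18    : 0 を 11..138 回
--     """
--     seq = list(litlen) + list(dist)
--     out: List[Tuple[int,int,int]] = []
--     i = 0
--     while i < len(seq):
--         cur = seq[i]
--         run = 1
--         j = i + 1
--         while j < len(seq) and seq[j] == cur:
--             run += 1; j += 1
--
--         if cur == 0:
--             k = run
--             while k >= 11 and allow_18:
--                 use = min(138, k)
--                 out.append((18, use - 11, 7))
--                 k -= use
--             while k >= 3 and allow_17:
--                 out.append((17, k - 3, 3))
--                 k = 0
--             out.extend([(0, 0, 0)] * k)
--         else:
--             out.append((cur, 0, 0))
--             k = run - 1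
--             while k >= 3 and allow_16:
--                 consume = min(k, 6)
--                 out.append((16, consume - 3, 2))
--                 k -= consume
--             out.extend([(cur, 0, 0)] * k)
--
--         i = j
--
--     return out
-- ===== SOURCE B (Python) =====
-- from typing import List, Tuple
--
-- def rle_code_lengths_stream(litlen: List[int], dist: List[int], allow_16=True, allow_17=True, allow_18=True) -> List[Tuple[int,int,int]]:
--     # Two-pass: build an explicit run list, then emit each run's tokens by
--     # closed-form division instead of repeated-subtraction loops.
--     runs: List[List[int]] = []
--     for v in list(litlen) + list(dist):
--         if runs and runs[-1][0] == v:
--             runs[-1][1] += 1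
--         else:
--             runs.append([v, 1])
--     out: List[Tuple[int,int,int]] = []
--     for cur, n in runs:
--         if cur == 0:
--             k = n
--             if allow_18 and k >= 11:
--                 d, r = divmod(k, 138)
--                 if r >= 11:
--                     out += [(18, 127, 7)] * d + [(18, r - 11, 7)]
--                     k = 0
--                 else:
--                     out += [(18, 127, 7)] * d
--                     k = r
--             if allow_17 and k >= 3:
--                 out.append((17, k - 3, 3))
--                 k = 0
--             out += [(0, 0, 0)] * k
--         else:
--             out.append((cur, 0, 0))
--             k = n - 1
--             if allow_16 and k >= 3:
--                 d, r = divmod(k, 6)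
--                 if r >= 3:
--                     out += [(16, 3, 2)] * d + [(16, r - 3, 2)]
--                     k = 0
--                 else:
--                     out += [(16, 3, 2)] * d
--                     k = r
--             out += [(cur, 0, 0)] * k
--     return out
-- ===== Notes on version B (the rewrite author's own statement) =====
-- stated objective: alternative
-- what changed: A walks the sequence with an index, scanning each run in place and emitting 18/16 tokens by repeated-subtraction while-loops; B first builds an explicit (value, count) run list in one pass and then emits each run's tokens by closed-form divmod arithmetic (replicated full tokens plus one remainder token).
import Mathlib
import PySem

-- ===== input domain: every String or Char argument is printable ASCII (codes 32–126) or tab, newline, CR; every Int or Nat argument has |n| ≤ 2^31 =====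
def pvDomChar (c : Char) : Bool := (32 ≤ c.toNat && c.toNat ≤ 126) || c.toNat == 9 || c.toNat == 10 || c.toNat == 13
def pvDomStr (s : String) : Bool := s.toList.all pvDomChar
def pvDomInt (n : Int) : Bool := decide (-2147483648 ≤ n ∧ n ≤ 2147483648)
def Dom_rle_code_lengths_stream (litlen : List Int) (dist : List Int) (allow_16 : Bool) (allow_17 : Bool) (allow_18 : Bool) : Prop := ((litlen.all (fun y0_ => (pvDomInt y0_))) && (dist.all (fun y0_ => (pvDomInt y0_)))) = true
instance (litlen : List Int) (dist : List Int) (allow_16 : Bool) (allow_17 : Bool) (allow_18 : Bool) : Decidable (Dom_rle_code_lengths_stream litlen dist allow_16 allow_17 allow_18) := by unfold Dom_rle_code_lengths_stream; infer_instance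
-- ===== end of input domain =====

-- B re-decomposes A's single index-walk with repeated-subtraction inner loops into two passes:
-- build an explicit (value, count) run list, then emit each run's tokens by closed-form div/mod
-- arithmetic (objective: alternative; same asymptotic cost).

-- ===== PORT A =====
-- count of leading elements of the list equal to c (A's inner 'while seq[j] == cur' scan)
def pvCnt (c : Int) : List Int → Nat
  | [] => 0
  | x :: xs => if x = c then pvCnt c xs + 1 else 0

-- A's 'while k >= 11 and allow_18' loop; returns (emitted tokens, leftover k)
def pvLoop18 (k : Nat) (a18 : Bool) : List (Int × Int × Int) × Nat :=
  if h : 11 ≤ k ∧ a18 = true then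
    let use := min 138 k
    let r := pvLoop18 (k - use) a18
    ((18, (use : Int) - 11, 7) :: r.1, r.2)
  else ([], k)
termination_by k
decreasing_by omega

-- A's 'while k >= 3 and allow_16' loop; returns (emitted tokens, leftover k)
def pvLoop16 (k : Nat) (a16 : Bool) : List (Int × Int × Int) × Nat :=
  if h : 3 ≤ k ∧ a16 = true then
    let consume := min k 6
    let r := pvLoop16 (k - consume) a16
    ((16, (consume : Int) - 3, 2) :: r.1, r.2)
  else ([], k)
termination_by k
decreasing_by omega

-- A's cur == 0 branch.  Python's 'while k >= 3 and allow_17' sets k = 0 in its body,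
-- so it iterates at most once: ported as a single conditional.
def pvEmitZeroA (run : Nat) (a17 a18 : Bool) : List (Int × Int × Int) :=
  let p := pvLoop18 run a18
  let q : List (Int × Int × Int) × Nat :=
    if 3 ≤ p.2 ∧ a17 = true then ([((17 : Int), (p.2 : Int) - 3, (3 : Int))], 0) else ([], p.2)
  p.1 ++ q.1 ++ List.replicate q.2 ((0 : Int), (0 : Int), (0 : Int))

-- A's cur != 0 branch
def pvEmitNonzeroA (cur : Int) (run : Nat) (a16 : Bool) : List (Int × Int × Int) :=
  let p := pvLoop16 (run - 1) a16
  (cur, 0, 0) :: (p.1 ++ List.replicate p.2 (cur, (0 : Int), (0 : Int)))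

-- A's outer 'while i < len(seq)' walk: find the run at the front, emit, continue after it
def pvALoop (a16 a17 a18 : Bool) : List Int → List (Int × Int × Int)
  | [] => []
  | cur :: rest =>
      let c := pvCnt cur rest
      (if cur = 0 then pvEmitZeroA (c + 1) a17 a18 else pvEmitNonzeroA cur (c + 1) a16)
        ++ pvALoop a16 a17 a18 (rest.drop c)
termination_by xs => xs.length
decreasing_by simp only [List.length_drop, List.length_cons]; omega

def rle_code_lengths_stream (litlen : List Int) (dist : List Int) (allow_16 : Bool) (allow_17 : Bool) (allow_18 : Bool) : List (Int × Int × Int) :=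
  pvALoop allow_16 allow_17 allow_18 (litlen ++ dist)

-- ===== PORT B =====
-- Source B's first pass: runs kept newest-first while folding (Python appends/increments runs[-1]), then reversed
def pvStep (acc : List (Int × Nat)) (v : Int) : List (Int × Nat) :=
  match acc with
  | (y, n) :: rs => if y = v then (y, n + 1) :: rs else (v, 1) :: (y, n) :: rs
  | [] => [(v, 1)]

def pvRunsB (seq : List Int) : List (Int × Nat) := (seq.foldl pvStep []).reverse

-- Source B's closed-form 18-token emission: divmod(k, 138)
def pvEmit18B (k : Nat) : List (Int × Int × Int) × Nat :=
  let d := k / 138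
  let r := k % 138
  if 11 ≤ r then (List.replicate d ((18 : Int), (127 : Int), (7 : Int)) ++ [(18, (r : Int) - 11, 7)], 0)
  else (List.replicate d ((18 : Int), (127 : Int), (7 : Int)), r)

-- Source B's closed-form 16-token emission: divmod(k, 6)
def pvEmit16B (k : Nat) : List (Int × Int × Int) × Nat :=
  let d := k / 6
  let r := k % 6
  if 3 ≤ r then (List.replicate d ((16 : Int), (3 : Int), (2 : Int)) ++ [(16, (r : Int) - 3, 2)], 0)
  else (List.replicate d ((16 : Int), (3 : Int), (2 : Int)), r)

-- Source B's second pass: tokens for one run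
def pvEmitRunB (cur : Int) (n : Nat) (a16 a17 a18 : Bool) : List (Int × Int × Int) :=
  if cur = 0 then
    let p := if a18 = true ∧ 11 ≤ n then pvEmit18B n else ([], n)
    let q : List (Int × Int × Int) × Nat :=
      if a17 = true ∧ 3 ≤ p.2 then ([((17 : Int), (p.2 : Int) - 3, (3 : Int))], 0) else ([], p.2)
    p.1 ++ q.1 ++ List.replicate q.2 ((0 : Int), (0 : Int), (0 : Int))
  else
    let p := if a16 = true ∧ 3 ≤ n - 1 then pvEmit16B (n - 1) else ([], n - 1)
    (cur, 0, 0) :: (p.1 ++ List.replicate p.2 (cur, (0 : Int), (0 : Int)))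

def rle_code_lengths_stream_alt (litlen : List Int) (dist : List Int) (allow_16 : Bool) (allow_17 : Bool) (allow_18 : Bool) : List (Int × Int × Int) :=
  (pvRunsB (litlen ++ dist)).flatMap (fun p => pvEmitRunB p.1 p.2 allow_16 allow_17 allow_18)

-- ===== PRECONDITION & SPEC =====
def Spec_rle_code_lengths_stream (litlen : List Int) (dist : List Int) (allow_16 : Bool) (allow_17 : Bool) (allow_18 : Bool) (out : List (Int × Int × Int)) : Prop := out = rle_code_lengths_stream_alt litlen dist allow_16 allow_17 allow_18
instance (litlen : List Int) (dist : List Int) (allow_16 : Bool) (allow_17 : Bool) (allow_18 : Bool) (out : List (Int × Int × Int)) : Decidable (Spec_rle_code_lengths_stream litlen dist allow_16 allow_17 allow_18 out) := by unfold Spec_rle_code_lengths_stream; infer_instance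

-- ===== CLAIM (what is proved, stated in full; the proofs are below) =====
def Claim_equal_rle_code_lengths_stream : Prop := ∀ (litlen : List Int) (dist : List Int) (allow_16 : Bool) (allow_17 : Bool) (allow_18 : Bool), Dom_rle_code_lengths_stream litlen dist allow_16 allow_17 allow_18 → Spec_rle_code_lengths_stream litlen dist allow_16 allow_17 allow_18 (rle_code_lengths_stream litlen dist allow_16 allow_17 allow_18)

-- ===== LEMMAS AND PROOFS =====

-- canonical run decomposition (A's traversal order)
def pvRunsOf : List Int → List (Int × Nat)
  | [] => []
  | x :: xs => (x, pvCnt x xs + 1) :: pvRunsOf (xs.drop (pvCnt x xs))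
termination_by xs => xs.length
decreasing_by simp only [List.length_drop, List.length_cons]; omega

theorem pvRunsOf_nil : pvRunsOf [] = [] := by rw [pvRunsOf.eq_def]

theorem pvRunsOf_cons_eq (x : Int) (xs : List Int) :
    pvRunsOf (x :: xs) = (x, pvCnt x xs + 1) :: pvRunsOf (xs.drop (pvCnt x xs)) := by
  rw [pvRunsOf.eq_def]

def pvConsRun (y : Int) (n : Nat) : List (Int × Nat) → List (Int × Nat)
  | (z, m) :: rest => if z = y then (y, n + m) :: rest else (y, n) :: (z, m) :: rest
  | [] => [(y, n)]

theorem pvConsRun_nil (y : Int) (n : Nat) : pvConsRun y n [] = [(y, n)] := rfl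

theorem pvConsRun_cons (y : Int) (n : Nat) (z : Int) (m : Nat) (rest : List (Int × Nat)) :
    pvConsRun y n ((z, m) :: rest) = if z = y then (y, n + m) :: rest else (y, n) :: (z, m) :: rest := rfl

theorem pvRunsOf_cons (x : Int) (l : List Int) :
    pvRunsOf (x :: l) = pvConsRun x 1 (pvRunsOf l) := by
  cases l with
  | nil => simp [pvRunsOf_cons_eq, pvRunsOf_nil, pvConsRun_nil, pvCnt]
  | cons z l' =>
      by_cases h : z = x
      · subst h
        rw [pvRunsOf_cons_eq, pvRunsOf_cons_eq z l']
        rw [pvConsRun_cons, if_pos rfl]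
        have hc : pvCnt z (z :: l') = pvCnt z l' + 1 := by simp [pvCnt]
        rw [hc]
        simp only [List.drop_succ_cons]
        rw [show pvCnt z l' + 1 + 1 = 1 + (pvCnt z l' + 1) from by omega]
      · rw [pvRunsOf_cons_eq x (z :: l')]
        have hc : pvCnt x (z :: l') = 0 := by simp [pvCnt, h]
        rw [hc]
        simp only [List.drop_zero]
        rw [pvRunsOf_cons_eq z l', pvConsRun_cons, if_neg h]

theorem pvConsRun_merge (y : Int) (n : Nat) (rl : List (Int × Nat)) :
    pvConsRun y n (pvConsRun y 1 rl) = pvConsRun y (n + 1) rl := by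
  cases rl with
  | nil => simp [pvConsRun_nil, pvConsRun_cons]
  | cons p rest =>
      obtain ⟨z, m⟩ := p
      by_cases h : z = y
      · subst h
        rw [pvConsRun_cons, if_pos rfl, pvConsRun_cons, if_pos rfl, pvConsRun_cons, if_pos rfl]
        rw [show n + (1 + m) = n + 1 + m from by omega]
      · rw [pvConsRun_cons, if_neg h, pvConsRun_cons, if_pos rfl, pvConsRun_cons, if_neg h]

theorem pvConsRun_ne (y : Int) (n : Nat) (x : Int) (k : Nat) (rl : List (Int × Nat))
    (h : ¬ x = y) : pvConsRun y n (pvConsRun x k rl) = (y, n) :: pvConsRun x k rl := by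
  cases rl with
  | nil => rw [pvConsRun_nil, pvConsRun_cons, if_neg h]
  | cons p rest =>
      obtain ⟨z, m⟩ := p
      by_cases hz : z = x
      · rw [pvConsRun_cons, if_pos hz, pvConsRun_cons, if_neg h]
      · rw [pvConsRun_cons, if_neg hz, pvConsRun_cons, if_neg (by intro hc; exact h hc)]

theorem pvFoldl_runs (xs : List Int) : ∀ (y : Int) (n : Nat) (rs : List (Int × Nat)),
    (List.foldl pvStep ((y, n) :: rs) xs).reverse = rs.reverse ++ pvConsRun y n (pvRunsOf xs) := by
  induction xs with
  | nil => intro y n rs; simp [pvRunsOf_nil, pvConsRun_nil]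
  | cons x xs' ih =>
      intro y n rs
      rw [pvRunsOf_cons]
      by_cases h : y = x
      · subst h
        rw [List.foldl_cons, show pvStep ((y, n) :: rs) y = (y, n + 1) :: rs from by simp [pvStep]]
        rw [ih, pvConsRun_merge]
      · rw [List.foldl_cons, show pvStep ((y, n) :: rs) x = (x, 1) :: (y, n) :: rs from by simp [pvStep, h]]
        rw [ih]
        simp only [List.reverse_cons, List.append_assoc, List.singleton_append]
        rw [pvConsRun_ne y n x 1 (pvRunsOf xs') (fun hc => h hc.symm)]

theorem pvRunsB_eq (seq : List Int) : pvRunsB seq = pvRunsOf seq := by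
  cases seq with
  | nil => simp [pvRunsB, pvRunsOf_nil]
  | cons x rest =>
      rw [pvRunsOf_cons]
      simp only [pvRunsB, List.foldl_cons, pvStep]
      simpa using pvFoldl_runs rest x 1 []

-- closed-form characterisation of A's 18-loop
theorem pvLoop18_eq (a18 : Bool) (k : Nat) :
    pvLoop18 k a18 = if a18 = true ∧ 11 ≤ k then pvEmit18B k else ([], k) := by
  induction k using Nat.strong_induction_on with
  | _ k ih =>
      by_cases h : 11 ≤ k ∧ a18 = true
      · rw [pvLoop18, dif_pos h]
        by_cases h138 : 138 ≤ k
        · have hmin : min 138 k = 138 := by omega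
          have ihk := ih (k - 138) (by omega)
          simp only [hmin, ihk]
          by_cases h2 : a18 = true ∧ 11 ≤ k - 138
          · rw [if_pos h2, if_pos ⟨h.2, h.1⟩]
            simp only [pvEmit18B]
            have hd : k / 138 = (k - 138) / 138 + 1 := by omega
            have hr : k % 138 = (k - 138) % 138 := by omega
            rw [hd, hr]
            have hcast : ((138 : Nat) : Int) - 11 = 127 := by norm_num
            by_cases h3 : 11 ≤ (k - 138) % 138
            · rw [if_pos h3, if_pos h3]
              simp only [hcast, List.replicate_succ, List.cons_append]
            · rw [if_neg h3, if_neg h3]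
              simp only [hcast, List.replicate_succ]
          · have hlt : ¬ 11 ≤ k - 138 := fun hc => h2 ⟨h.2, hc⟩
            rw [if_neg h2, if_pos ⟨h.2, h.1⟩]
            simp only [pvEmit18B]
            have hd : k / 138 = 1 := by omega
            have hr : k % 138 = k - 138 := by omega
            rw [hd, hr, if_neg hlt]
            have hcast : ((138 : Nat) : Int) - 11 = 127 := by norm_num
            simp only [hcast, List.replicate_succ, List.replicate_zero]
        · have hmin : min 138 k = k := by omega
          have ihk := ih (k - k) (by omega)
          have h0 : ¬ (a18 = true ∧ 11 ≤ k - k) := by rintro ⟨-, hc⟩; omega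
          simp only [hmin, ihk, if_neg h0]
          rw [if_pos ⟨h.2, h.1⟩]
          simp only [pvEmit18B]
          have hd : k / 138 = 0 := by omega
          have hr : k % 138 = k := by omega
          rw [hd, hr, if_pos h.1]
          simp
      · rw [pvLoop18, dif_neg h]
        rw [if_neg (fun hc => h ⟨hc.2, hc.1⟩)]

-- closed-form characterisation of A's 16-loop
theorem pvLoop16_eq (a16 : Bool) (k : Nat) :
    pvLoop16 k a16 = if a16 = true ∧ 3 ≤ k then pvEmit16B k else ([], k) := by
  induction k using Nat.strong_induction_on with
  | _ k ih =>
      by_cases h : 3 ≤ k ∧ a16 = true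
      · rw [pvLoop16, dif_pos h]
        by_cases h6 : 6 ≤ k
        · have hmin : min k 6 = 6 := by omega
          have ihk := ih (k - 6) (by omega)
          simp only [hmin, ihk]
          by_cases h2 : a16 = true ∧ 3 ≤ k - 6
          · rw [if_pos h2, if_pos ⟨h.2, h.1⟩]
            simp only [pvEmit16B]
            have hd : k / 6 = (k - 6) / 6 + 1 := by omega
            have hr : k % 6 = (k - 6) % 6 := by omega
            rw [hd, hr]
            have hcast : ((6 : Nat) : Int) - 3 = 3 := by norm_num
            by_cases h3 : 3 ≤ (k - 6) % 6
            · rw [if_pos h3, if_pos h3]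
              simp only [hcast, List.replicate_succ, List.cons_append]
            · rw [if_neg h3, if_neg h3]
              simp only [hcast, List.replicate_succ]
          · have hlt : ¬ 3 ≤ k - 6 := fun hc => h2 ⟨h.2, hc⟩
            rw [if_neg h2, if_pos ⟨h.2, h.1⟩]
            simp only [pvEmit16B]
            have hd : k / 6 = 1 := by omega
            have hr : k % 6 = k - 6 := by omega
            rw [hd, hr, if_neg hlt]
            have hcast : ((6 : Nat) : Int) - 3 = 3 := by norm_num
            simp only [hcast, List.replicate_succ, List.replicate_zero]
        · have hmin : min k 6 = k := by omega
          have ihk := ih (k - k) (by omega)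
          have h0 : ¬ (a16 = true ∧ 3 ≤ k - k) := by rintro ⟨-, hc⟩; omega
          simp only [hmin, ihk, if_neg h0]
          rw [if_pos ⟨h.2, h.1⟩]
          simp only [pvEmit16B]
          have hd : k / 6 = 0 := by omega
          have hr : k % 6 = k := by omega
          rw [hd, hr, if_pos h.1]
          simp
      · rw [pvLoop16, dif_neg h]
        rw [if_neg (fun hc => h ⟨hc.2, hc.1⟩)]

theorem pvEmitRun_eq (cur : Int) (n : Nat) (a16 a17 a18 : Bool) :
    (if cur = 0 then pvEmitZeroA n a17 a18 else pvEmitNonzeroA cur n a16)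
      = pvEmitRunB cur n a16 a17 a18 := by
  by_cases hc : cur = 0
  · subst hc
    rw [if_pos rfl]
    simp only [pvEmitZeroA, pvEmitRunB, pvLoop18_eq]
    all_goals (by_cases h17 : a17 = true <;>
      by_cases h3 : 3 ≤ (if a18 = true ∧ 11 ≤ n then pvEmit18B n else ([], n)).2 <;>
      simp [h17, h3])
  · rw [if_neg hc]
    simp only [pvEmitNonzeroA, pvEmitRunB, pvLoop16_eq, if_neg hc]

theorem pvALoop_eq (a16 a17 a18 : Bool) (seq : List Int) :
    pvALoop a16 a17 a18 seq
      = (pvRunsOf seq).flatMap (fun p => pvEmitRunB p.1 p.2 a16 a17 a18) := by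
  induction seq using pvRunsOf.induct with
  | case1 => rw [pvALoop, pvRunsOf_nil]; simp
  | case2 x xs ih =>
      rw [pvALoop, pvRunsOf_cons_eq]
      simp only [List.flatMap_cons]
      rw [ih, pvEmitRun_eq]

-- ===== VERDICT (by name: the statement is the Claim_ definition above) =====
theorem rle_code_lengths_stream_spec : Claim_equal_rle_code_lengths_stream := by
  intro litlen dist a16 a17 a18 _
  unfold Spec_rle_code_lengths_stream rle_code_lengths_stream rle_code_lengths_stream_alt
  rw [pvRunsB_eq, pvALoop_eq]
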